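-- pv_equiv track=rewrite | github.com/areesha-gul/career_recommendation | modules/module3_csp.py | _run_ac3
-- ===== SOURCE A (Python) =====
-- from collections import deque
--
-- def _revise_role_domain(
--     role_domain_values: list[str],
--     domain_values: list[str],
--     role_to_domain: dict[str, str],
-- ) -> tuple[list[str], bool]:
--     """AC-3 revise step for arc: role -> domain."""
--     allowed_domains = set(domain_values)
--     revised = [role for role in role_domain_values if role_to_domain.get(role, "") in allowed_domains]
--     return revised, len(revised) != len(role_domain_values)
--
-- def _revise_domain_role(
--     domain_values: list[str],
--     role_domain_values: list[str],
--     role_to_domain: dict[str, str],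
-- ) -> tuple[list[str], bool]:
--     """AC-3 revise step for arc: domain -> role."""
--     reachable_domains = {role_to_domain.get(role, "") for role in role_domain_values}
--     revised = [domain for domain in domain_values if domain in reachable_domains]
--     return revised, len(revised) != len(domain_values)
--
-- def _run_ac3(domains: dict[str, list[str]], role_to_domain: dict[str, str]) -> bool:
--     """Run AC-3 on a two-variable CSP (role, domain)."""
--     queue = deque([("role", "domain"), ("domain", "role")])
--
--     while queue:
--         left, right = queue.popleft()
--         if left == "role" and right == "domain":
--             revised_values, revised = _revise_role_domain(domains["role"], domains["domain"], role_to_domain)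
--             if revised:
--                 domains["role"] = revised_values
--                 if not domains["role"]:
--                     return False
--                 queue.append(("domain", "role"))
--         elif left == "domain" and right == "role":
--             revised_values, revised = _revise_domain_role(domains["domain"], domains["role"], role_to_domain)
--             if revised:
--                 domains["domain"] = revised_values
--                 if not domains["domain"]:
--                     return False
--                 queue.append(("role", "domain"))
--
--     return True
-- ===== SOURCE B (Python) =====
-- def _run_ac3(domains, role_to_domain):
--     """Two direct filter passes instead of the deque worklist (same result and
--     same in-place mutations of `domains` as the AC-3 loop)."""
--     old_roles = domains["role"]
--     old_domains = domains["domain"]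
--     allowed = set(old_domains)
--     roles = [r for r in old_roles if role_to_domain.get(r, "") in allowed]
--     if len(roles) != len(old_roles):
--         domains["role"] = roles
--         if not roles:
--             return False
--     reachable = {role_to_domain.get(r, "") for r in roles}
--     doms = [d for d in old_domains if d in reachable]
--     if len(doms) != len(old_domains):
--         domains["domain"] = doms
--         if not doms:
--             return False
--     return True
-- ===== Notes on version B (the rewrite author's own statement) =====
-- stated objective: simpler
-- what changed: Replaced the deque-based AC-3 worklist loop (arc dispatch, re-enqueueing) with two direct sequential filter passes, which reach the same fixpoint because after one role pass and one domain pass no further revision can remove anything.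
import Mathlib
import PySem

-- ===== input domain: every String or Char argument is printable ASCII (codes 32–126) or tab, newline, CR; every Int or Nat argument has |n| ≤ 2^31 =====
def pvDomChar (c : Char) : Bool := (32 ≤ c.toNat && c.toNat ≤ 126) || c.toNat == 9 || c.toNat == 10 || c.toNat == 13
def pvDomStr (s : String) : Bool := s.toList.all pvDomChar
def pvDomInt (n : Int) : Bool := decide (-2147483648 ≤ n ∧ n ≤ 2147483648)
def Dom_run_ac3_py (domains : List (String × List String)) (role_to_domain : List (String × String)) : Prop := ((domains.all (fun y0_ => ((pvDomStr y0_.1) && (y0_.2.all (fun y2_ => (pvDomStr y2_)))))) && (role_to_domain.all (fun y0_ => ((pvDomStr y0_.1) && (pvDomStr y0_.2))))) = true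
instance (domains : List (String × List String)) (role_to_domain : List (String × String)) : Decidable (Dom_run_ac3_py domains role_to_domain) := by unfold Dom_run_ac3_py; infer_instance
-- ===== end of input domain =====

-- B replaces the deque-worklist AC-3 loop by two direct filter passes (simpler; same
-- return value AND the same in-place mutations of `domains`, so only the return value
-- is claimed here but the side effects coincide too).

-- ===== PORT A =====
-- AC-3 revise step for arc: role -> domain  (Python _revise_role_domain, revised list only;
-- the 'revised' flag len(revised) != len(orig) is tested at the call site)
def reviseRoleDomain (role_domain_values domain_values : List String) (role_to_domain : List (String × String)) : List String :=
  role_domain_values.filter (fun role =>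
    (PySem.Set.ofList domain_values).contains ((PySem.Dict.mk role_to_domain).getD role ""))

-- AC-3 revise step for arc: domain -> role  (Python _revise_domain_role)
def reviseDomainRole (domain_values role_domain_values : List String) (role_to_domain : List (String × String)) : List String :=
  domain_values.filter (fun d =>
    (PySem.Set.ofList (role_domain_values.map (fun role => (PySem.Dict.mk role_to_domain).getD role ""))).contains d)

-- the 'while queue:' loop of _run_ac3, carrying the queue and the two mutable entries of `domains`
def ac3Loop (queue : List (String × String)) (roleVals domVals : List String) (role_to_domain : List (String × String)) : Bool :=
  match queue with
  | [] => true
  | (left, right) :: rest =>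
    if left == "role" && right == "domain" then
      let revised_values := reviseRoleDomain roleVals domVals role_to_domain
      if _h : revised_values.length ≠ roleVals.length then
        if revised_values.isEmpty then false
        else ac3Loop (rest ++ [("domain", "role")]) revised_values domVals role_to_domain
      else ac3Loop rest roleVals domVals role_to_domain
    else if left == "domain" && right == "role" then
      let revised_values := reviseDomainRole domVals roleVals role_to_domain
      if _h : revised_values.length ≠ domVals.length then
        if revised_values.isEmpty then false
        else ac3Loop (rest ++ [("role", "domain")]) roleVals revised_values role_to_domain
      else ac3Loop rest roleVals domVals role_to_domain
    else ac3Loop rest roleVals domVals role_to_domain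
termination_by roleVals.length + domVals.length + queue.length
decreasing_by
  · have hb : revised_values.length = (reviseRoleDomain roleVals domVals role_to_domain).length := rfl
    have hle : revised_values.length ≤ roleVals.length := List.length_filter_le _ roleVals
    simp only [List.length_append, List.length_cons, List.length_nil]
    omega
  · simp only [List.length_cons]; omega
  · have hb : revised_values.length = (reviseDomainRole domVals roleVals role_to_domain).length := rfl
    have hle : revised_values.length ≤ domVals.length := List.length_filter_le _ domVals
    simp only [List.length_append, List.length_cons, List.length_nil]
    omega
  · simp only [List.length_cons]; omega
  · simp only [List.length_cons]; omega

def run_ac3_py (domains : List (String × List String)) (role_to_domain : List (String × String)) : Bool :=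
  ac3Loop [("role", "domain"), ("domain", "role")]
    ((PySem.Dict.mk domains).getD "role" []) ((PySem.Dict.mk domains).getD "domain" []) role_to_domain

-- ===== PORT B =====
def run_ac3_py_alt (domains : List (String × List String)) (role_to_domain : List (String × String)) : Bool :=
  let old_roles := (PySem.Dict.mk domains).getD "role" []
  let old_domains := (PySem.Dict.mk domains).getD "domain" []
  let allowed := PySem.Set.ofList old_domains
  let roles := old_roles.filter (fun r => allowed.contains ((PySem.Dict.mk role_to_domain).getD r ""))
  if roles.length ≠ old_roles.length ∧ roles = [] then false
  else
    let reachable := PySem.Set.ofList (roles.map (fun r => (PySem.Dict.mk role_to_domain).getD r ""))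
    let doms := old_domains.filter (fun d => reachable.contains d)
    if doms.length ≠ old_domains.length ∧ doms = [] then false
    else true

-- ===== PRECONDITION & SPEC =====
-- Pre_ excludes exactly the dicts missing the "role" or "domain" key, on which Python A raises KeyError.
def Pre_run_ac3_py (domains : List (String × List String)) (role_to_domain : List (String × String)) : Prop :=
  (PySem.Dict.mk domains).contains "role" = true ∧ (PySem.Dict.mk domains).contains "domain" = true
instance (domains : List (String × List String)) (role_to_domain : List (String × String)) : Decidable (Pre_run_ac3_py domains role_to_domain) := by unfold Pre_run_ac3_py; infer_instance

def pvWitness_run_ac3_py : (List (String × List String)) × (List (String × String)) :=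
  ([("role", ["r1", "r2"]), ("domain", ["d1"])], [("r1", "d1"), ("r2", "d2")])

def Spec_run_ac3_py (domains : List (String × List String)) (role_to_domain : List (String × String)) (out : Bool) : Prop := out = run_ac3_py_alt domains role_to_domain
instance (domains : List (String × List String)) (role_to_domain : List (String × String)) (out : Bool) : Decidable (Spec_run_ac3_py domains role_to_domain out) := by unfold Spec_run_ac3_py; infer_instance

-- ===== CLAIM (what is proved, stated in full; the proofs are below) =====
def Claim_equal_run_ac3_py : Prop := ∀ (domains : List (String × List String)) (role_to_domain : List (String × String)), Dom_run_ac3_py domains role_to_domain → Pre_run_ac3_py domains role_to_domain → Spec_run_ac3_py domains role_to_domain (run_ac3_py domains role_to_domain)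

-- ===== LEMMAS AND PROOFS =====

-- a filtered list whose length did not change is the whole list
theorem filter_eq_of_length_eq {α : Type} (p : α → Bool) (xs : List α)
    (h : (xs.filter p).length = xs.length) : xs.filter p = xs :=
  List.Sublist.eq_of_length_le List.filter_sublist (le_of_eq h.symm)

-- once both arcs are stable (no revise changes anything), the AC-3 loop returns true from any queue
theorem ac3Loop_stable (rtd : List (String × String)) (r d : List String)
    (hr : reviseRoleDomain r d rtd = r) (hd : reviseDomainRole d r rtd = d) :
    ∀ q : List (String × String), ac3Loop q r d rtd = true := by
  intro q
  induction q with
  | nil => rw [ac3Loop]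
  | cons arc rest ih =>
    obtain ⟨l, rt⟩ := arc
    rw [ac3Loop]
    by_cases h1 : (l == "role" && rt == "domain") = true
    · simp [h1, hr, ih]
    · by_cases h2 : (l == "domain" && rt == "role") = true
      · simp [h1, h2, hd, ih]
      · simp [h1, h2, ih]

-- the role pass is idempotent: filtering a filtered list again changes nothing
theorem reviseRoleDomain_idem (rtd : List (String × String)) (r d : List String) :
    reviseRoleDomain (reviseRoleDomain r d rtd) d rtd = reviseRoleDomain r d rtd := by
  simp [reviseRoleDomain, List.filter_filter]

-- the domain pass is idempotent
theorem reviseDomainRole_idem (rtd : List (String × String)) (d r : List String) :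
    reviseDomainRole (reviseDomainRole d r rtd) r rtd = reviseDomainRole d r rtd := by
  simp [reviseDomainRole, List.filter_filter]

-- after the role pass, the domain pass keeps the image of every surviving role, so a
-- further role pass removes nothing
theorem reviseRoleDomain_stable (rtd : List (String × String)) (r0 d0 : List String) :
    reviseRoleDomain (reviseRoleDomain r0 d0 rtd) (reviseDomainRole d0 (reviseRoleDomain r0 d0 rtd) rtd) rtd
      = reviseRoleDomain r0 d0 rtd := by
  apply List.filter_eq_self.mpr
  intro role hrole
  have hmem := List.of_mem_filter hrole
  rw [PySem.Set.contains_iff, PySem.Set.mem_ofList] at hmem ⊢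
  unfold reviseDomainRole
  rw [List.mem_filter]
  refine ⟨hmem, ?_⟩
  rw [PySem.Set.contains_iff, PySem.Set.mem_ofList]
  exact List.mem_map_of_mem hrole

-- length-preserving revisions change nothing
theorem reviseRoleDomain_eq_of_len (rtd : List (String × String)) (r d : List String)
    (h : (reviseRoleDomain r d rtd).length = r.length) : reviseRoleDomain r d rtd = r :=
  filter_eq_of_length_eq _ r h

theorem reviseDomainRole_eq_of_len (rtd : List (String × String)) (d r : List String)
    (h : (reviseDomainRole d r rtd).length = d.length) : reviseDomainRole d r rtd = d :=
  filter_eq_of_length_eq _ d h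

-- the core equivalence: the AC-3 worklist on the two initial arcs computes exactly B's two passes
theorem core_eq (rtd : List (String × String)) (r0 d0 : List String) :
    ac3Loop [("role", "domain"), ("domain", "role")] r0 d0 rtd =
      (let r1 := reviseRoleDomain r0 d0 rtd
       if r1.length ≠ r0.length ∧ r1 = [] then false
       else
         let d1 := reviseDomainRole d0 r1 rtd
         if d1.length ≠ d0.length ∧ d1 = [] then false
         else true) := by
  rw [ac3Loop]
  simp only [beq_self_eq_true, Bool.and_self, if_true]
  by_cases hlen1 : (reviseRoleDomain r0 d0 rtd).length ≠ r0.length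
  · rw [dif_pos hlen1]
    by_cases hemp1 : reviseRoleDomain r0 d0 rtd = []
    · rw [if_pos (List.isEmpty_iff.mpr hemp1), if_pos ⟨hlen1, hemp1⟩]
    · rw [if_neg (by simpa using hemp1), if_neg (fun hc => hemp1 hc.2)]
      -- second iteration, queue = [A2, A2]
      simp only [List.cons_append, List.nil_append]
      rw [ac3Loop]
      rw [if_neg (show ¬((("domain" : String) == "role" && ("role" : String) == "domain") = true) from by decide)]
      rw [if_pos (show (("domain" : String) == "domain" && ("role" : String) == "role") = true from by decide)]
      by_cases hlen2 : (reviseDomainRole d0 (reviseRoleDomain r0 d0 rtd) rtd).length ≠ d0.length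
      · rw [dif_pos hlen2]
        by_cases hemp2 : reviseDomainRole d0 (reviseRoleDomain r0 d0 rtd) rtd = []
        · rw [if_pos (List.isEmpty_iff.mpr hemp2), if_pos ⟨hlen2, hemp2⟩]
        · rw [if_neg (by simpa using hemp2), if_neg (fun hc => hemp2 hc.2)]
          exact ac3Loop_stable rtd _ _ (reviseRoleDomain_stable rtd r0 d0)
            (reviseDomainRole_idem rtd d0 (reviseRoleDomain r0 d0 rtd)) _
      · rw [dif_neg hlen2, if_neg (fun hc => hlen2 hc.1)]
        have hd0 : reviseDomainRole d0 (reviseRoleDomain r0 d0 rtd) rtd = d0 :=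
          reviseDomainRole_eq_of_len rtd d0 _ (not_ne_iff.mp hlen2)
        exact ac3Loop_stable rtd _ _ (reviseRoleDomain_idem rtd r0 d0) hd0 _
  · rw [dif_neg hlen1, if_neg (fun hc => hlen1 hc.1)]
    have hr0 : reviseRoleDomain r0 d0 rtd = r0 :=
      reviseRoleDomain_eq_of_len rtd r0 d0 (not_ne_iff.mp hlen1)
    -- second iteration, queue = [A2]
    rw [ac3Loop]
    rw [if_neg (show ¬((("domain" : String) == "role" && ("role" : String) == "domain") = true) from by decide)]
    rw [if_pos (show (("domain" : String) == "domain" && ("role" : String) == "role") = true from by decide)]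
    by_cases hlen2 : (reviseDomainRole d0 r0 rtd).length ≠ d0.length
    · rw [dif_pos hlen2]
      have hrw : reviseDomainRole d0 (reviseRoleDomain r0 d0 rtd) rtd = reviseDomainRole d0 r0 rtd := by
        rw [hr0]
      by_cases hemp2 : reviseDomainRole d0 r0 rtd = []
      · rw [if_pos (List.isEmpty_iff.mpr hemp2), if_pos ⟨by rw [hrw]; exact hlen2, by rw [hrw]; exact hemp2⟩]
      · rw [if_neg (by simpa using hemp2), if_neg (fun hc => hemp2 (hrw ▸ hc.2))]
        refine ac3Loop_stable rtd r0 (reviseDomainRole d0 r0 rtd) ?_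
          (reviseDomainRole_idem rtd d0 r0) _
        have := reviseRoleDomain_stable rtd r0 d0
        rwa [hr0] at this
    · rw [dif_neg hlen2]
      have hd0 : reviseDomainRole d0 r0 rtd = d0 :=
        reviseDomainRole_eq_of_len rtd d0 r0 (not_ne_iff.mp hlen2)
      rw [if_neg (fun hc => hlen2 (by rw [hr0] at hc; exact hc.1))]
      exact ac3Loop_stable rtd r0 d0 hr0 hd0 _

-- ===== VERDICT (by name: the statement is the Claim_ definition above) =====
theorem run_ac3_py_spec : Claim_equal_run_ac3_py := by
  intro domains rtd _ _
  exact core_eq rtd ((PySem.Dict.mk domains).getD "role" []) ((PySem.Dict.mk domains).getD "domain" [])
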